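-- pv_equiv track=rewrite | github.com/981377660LMT/algorithm-study | 8_heap/分类/多路归并/2931. 购买物品的最大开销.py | maxSpending
-- ===== SOURCE A (Python) =====
-- from typing import List
-- from heapq import heapify, heappop, heappush
--
-- def maxSpending(values: List[List[int]]) -> int:
--     ROW, COL = len(values), len(values[0])
--     pq = []  # (value, row, col)
--     for r, row in enumerate(values):
--         pq.append((row[-1], r, COL - 1))
--     heapify(pq)
--     res = 0
--     for day in range(1, ROW * COL + 1):
--         min_, r, c = heappop(pq)
--         res += min_ * day
--         if c > 0:
--             heappush(pq, (values[r][c - 1], r, c - 1))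
--     return res
-- ===== SOURCE B (Python) =====
-- def maxSpending(values):
--     # Selection-based k-way merge: keep one (current value, column) frontier
--     # entry per row and pick the row with the smallest current value (earliest
--     # row on ties) by a linear scan, instead of A's heap of triples.
--     ROW, COL = len(values), len(values[0])
--     front = [(row[-1], COL - 1) for row in values]
--     res = 0
--     for day in range(1, ROW * COL + 1):
--         best = None
--         for r in range(ROW):
--             e = front[r]
--             if e is not None and (best is None or e[0] < front[best][0]):
--                 best = r
--         v, c = front[best]
--         res += v * day
--         front[best] = (values[best][c - 1], c - 1) if c > 0 else None
--     return res
-- ===== Notes on version B (the rewrite author's own statement) =====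
-- stated objective: alternative
-- what changed: Replaces A's heap-based k-way merge (a heapq of (value,row,col) triples) with a per-row frontier array from which the minimum current value (earliest row on ties) is selected by a plain linear scan each day.
import Mathlib
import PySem

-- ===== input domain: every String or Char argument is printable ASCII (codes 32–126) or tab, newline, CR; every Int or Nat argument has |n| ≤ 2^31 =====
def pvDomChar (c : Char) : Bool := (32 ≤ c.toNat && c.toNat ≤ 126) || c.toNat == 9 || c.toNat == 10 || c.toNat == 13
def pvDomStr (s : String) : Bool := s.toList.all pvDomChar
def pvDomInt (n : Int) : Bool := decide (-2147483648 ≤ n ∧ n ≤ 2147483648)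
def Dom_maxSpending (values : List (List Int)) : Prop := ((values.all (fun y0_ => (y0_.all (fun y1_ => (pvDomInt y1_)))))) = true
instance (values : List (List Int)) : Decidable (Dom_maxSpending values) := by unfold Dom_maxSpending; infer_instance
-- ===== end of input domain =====

-- B replaces A's heap-based k-way merge by a per-row frontier array scanned linearly
-- for its minimum each day (an alternative algorithm of similar cost, no speed claim).


-- ===== PORT A =====
-- Python's tuple comparison (value, row, col) < (value', row', col'), lexicographic.
def pvLt3 (x y : Int × Int × Int) : Bool :=
  x.1 < y.1 || (x.1 == y.1 && (x.2.1 < y.2.1 || (x.2.1 == y.2.1 && x.2.2 < y.2.2)))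

-- heapq is modelled extensionally (exact, since only the pop order of a heap is
-- observable): heapify = identity on the element list, heappush = append,
-- heappop = remove the lexicographically least tuple (pvPopMin?; none = IndexError).
def pvPopMin? : List (Int × Int × Int) → Option ((Int × Int × Int) × List (Int × Int × Int))
  | [] => none
  | x :: xs =>
    match pvPopMin? xs with
    | none => some (x, [])
    | some (m, rest) => if pvLt3 m x then some (m, x :: rest) else some (x, xs)

-- loop body of A's 'for day in range(1, ROW*COL+1)' (st = (pq, res)); the .getD defaults
-- stand for IndexErrors that Pre_ excludes.
def maxSpendingStep (values : List (List Int)) (st : List (Int × Int × Int) × Int) (day : Int) :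
    List (Int × Int × Int) × Int :=
  match pvPopMin? st.1 with
  | none => st  -- heappop from an empty heap raises IndexError; unreachable under Pre_
  | some (x, rest) =>
    let res := st.2 + x.1 * day
    if x.2.2 > 0 then
      (rest ++ [((PySem.List.pyGet? ((PySem.List.pyGet? values x.2.1).getD []) (x.2.2 - 1)).getD 0,
                 x.2.1, x.2.2 - 1)], res)
    else (rest, res)

def maxSpending (values : List (List Int)) : Int :=
  let COL : Int := ((PySem.List.pyGet? values 0).getD []).length
  let pq : List (Int × Int × Int) :=
    (PySem.List.enumerate values 0).map (fun rc => ((PySem.List.pyGet? rc.2 (-1)).getD 0, rc.1, COL - 1))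
  ((PySem.List.pyRange 1 ((values.length : Int) * COL + 1) 1).foldl (maxSpendingStep values) (pq, 0)).2

-- ===== PORT B =====
-- B's inner scan 'for r in range(ROW): …' selecting the frontier row with the least
-- current value (earliest row on a tie, via the strict '<').
def pvBest (n : Nat) (front : List (Option (Int × Int))) : Option Nat :=
  (List.range n).foldl
    (fun best r =>
      match front.getD r none with
      | none => best
      | some e =>
        match best with
        | none => some r
        | some b =>
          match front.getD b none with
          | none => some r
          | some eb => if e.1 < eb.1 then some r else best)
    none

-- loop body of B's 'for day in range(1, ROW*COL+1)' (st = (front, res)).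
def maxSpendingAltStep (values : List (List Int)) (st : List (Option (Int × Int)) × Int) (day : Int) :
    List (Option (Int × Int)) × Int :=
  match pvBest values.length st.1 with
  | none => st  -- 'front[best]' with best = None raises; unreachable under Pre_
  | some b =>
    match st.1.getD b none with
    | none => st  -- unreachable: pvBest only returns an occupied slot
    | some vc =>
      (st.1.set b (if vc.2 > 0 then
                     some ((PySem.List.pyGet? (values.getD b []) (vc.2 - 1)).getD 0, vc.2 - 1)
                   else none),
       st.2 + vc.1 * day)

def maxSpending_alt (values : List (List Int)) : Int :=
  let COL : Int := ((PySem.List.pyGet? values 0).getD []).length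
  let front : List (Option (Int × Int)) :=
    values.map (fun row => some ((PySem.List.pyGet? row (-1)).getD 0, COL - 1))
  ((PySem.List.pyRange 1 ((values.length : Int) * COL + 1) 1).foldl
      (maxSpendingAltStep values) (front, 0)).2

-- ===== PRECONDITION & SPEC =====
-- Exactly the inputs on which Python A returns: values nonempty (values[0] raises),
-- every row nonempty (row[-1] raises), and every row of length ≥ COL-1
-- (values[r][c-1] is accessed for c-1 = COL-2, …, 0).
def Pre_maxSpending (values : List (List Int)) : Prop :=
  values ≠ [] ∧ ∀ row ∈ values, 1 ≤ row.length ∧ (values.headD []).length ≤ row.length + 1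
instance (values : List (List Int)) : Decidable (Pre_maxSpending values) := by
  unfold Pre_maxSpending; infer_instance

def pvWitness_maxSpending : List (List Int) := [[8, 5, 2], [2, 4, 3], [1, 5, 3]]

def Spec_maxSpending (values : List (List Int)) (out : Int) : Prop := out = maxSpending_alt values
instance (values : List (List Int)) (out : Int) : Decidable (Spec_maxSpending values out) := by
  unfold Spec_maxSpending; infer_instance

-- ===== CLAIM =====
def Claim_equal_maxSpending : Prop :=
  ∀ (values : List (List Int)), Dom_maxSpending values → Pre_maxSpending values →
    Spec_maxSpending values (maxSpending values)

-- ===== LEMMAS AND PROOFS =====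

-- The frontier entries of B, as A's (value, row, col) triples, rows counted from s.
def pvFrontL (s : Int) : List (Option (Int × Int)) → List (Int × Int × Int)
  | [] => []
  | none :: fs => pvFrontL (s + 1) fs
  | some vc :: fs => (vc.1, s, vc.2) :: pvFrontL (s + 1) fs

theorem pvLt3_iff (x y : Int × Int × Int) :
    pvLt3 x y = true ↔
      (x.1 < y.1 ∨ (x.1 = y.1 ∧ (x.2.1 < y.2.1 ∨ (x.2.1 = y.2.1 ∧ x.2.2 < y.2.2)))) := by
  simp [pvLt3]

theorem pvPopMin?_eq_none {l : List (Int × Int × Int)} (h : pvPopMin? l = none) : l = [] := by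
  cases l with
  | nil => rfl
  | cons x xs =>
    simp only [pvPopMin?] at h
    cases hx : pvPopMin? xs with
    | none => simp [hx] at h
    | some p => rcases p with ⟨m, rest⟩; by_cases hlt : pvLt3 m x <;> simp [hx, hlt] at h

theorem pvPopMin?_spec :
    ∀ (l : List (Int × Int × Int)) (x : Int × Int × Int) (rest : List (Int × Int × Int)),
      pvPopMin? l = some (x, rest) →
        l.Perm (x :: rest) ∧ ∀ y ∈ l, ¬ pvLt3 y x = true := by
  intro l
  induction l with
  | nil => intro x rest h; simp [pvPopMin?] at h
  | cons a xs ih =>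
    intro x rest h
    simp only [pvPopMin?] at h
    cases hx : pvPopMin? xs with
    | none =>
      have hnil : xs = [] := by
        cases xs with
        | nil => rfl
        | cons b bs =>
          simp only [pvPopMin?] at hx
          cases hb : pvPopMin? bs with
          | none => simp [hb] at hx
          | some p => rcases p with ⟨m, r⟩; by_cases hlt : pvLt3 m b <;> simp [hb, hlt] at hx
      subst hnil
      rw [hx] at h
      obtain ⟨rfl, rfl⟩ := by simpa using h
      refine ⟨List.Perm.refl _, ?_⟩
      intro y hy
      simp at hy; subst hy
      simp [pvLt3_iff]
    | some p =>
      rcases p with ⟨m, r⟩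
      rw [hx] at h
      obtain ⟨hperm, hmin⟩ := ih m r hx
      by_cases hlt : pvLt3 m a = true
      · simp [hlt] at h
        obtain ⟨rfl, rfl⟩ := h
        constructor
        · exact (hperm.cons a).trans (List.Perm.swap m a _)
        · intro y hy
          rcases List.mem_cons.mp hy with rfl | hy'
          · rw [pvLt3_iff] at hlt ⊢; omega
          · exact hmin y hy'
      · simp [hlt] at h
        obtain ⟨rfl, rfl⟩ := h
        refine ⟨List.Perm.refl _, ?_⟩
        intro y hy
        rcases List.mem_cons.mp hy with rfl | hy'
        · simp [pvLt3_iff]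
        · have h1 := hmin y hy'
          rw [pvLt3_iff] at h1 hlt ⊢
          omega

def pvBestInv (front : List (Option (Int × Int))) (k : Nat) : Option Nat → Prop
  | none => ∀ r, r < k → front.getD r none = none
  | some b => b < k ∧ ∃ vc, front.getD b none = some vc ∧
      ∀ r, r < k → ∀ vc', front.getD r none = some vc' →
        ¬ (vc'.1 < vc.1 ∨ (vc'.1 = vc.1 ∧ r < b))

theorem pvBest_spec (front : List (Option (Int × Int))) (n : Nat) :
    pvBestInv front n (pvBest n front) := by
  unfold pvBest
  induction n with
  | zero => intro r hr; omega
  | succ k ih =>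
    rw [List.range_succ, List.foldl_append, List.foldl_cons, List.foldl_nil]
    set best := (List.range k).foldl _ none with hbest
    cases hk : front.getD k none with
    | none =>
      simp only
      cases hb : best with
      | none =>
        rw [hb] at ih
        intro r hr
        by_cases hrk : r = k
        · subst hrk; exact hk
        · exact ih r (by omega)
      | some b =>
        rw [hb] at ih
        obtain ⟨hlt, vc, hvc, hmin⟩ := ih
        refine ⟨by omega, vc, hvc, ?_⟩
        intro r hr vc' hvc'
        by_cases hrk : r = k
        · subst hrk; rw [hk] at hvc'; simp at hvc'
        · exact hmin r (by omega) vc' hvc'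
    | some e =>
      cases hb : best with
      | none =>
        rw [hb] at ih
        simp only
        refine ⟨by omega, e, hk, ?_⟩
        intro r hr vc' hvc'
        by_cases hrk : r = k
        · subst hrk; rw [hk] at hvc'; injection hvc' with hinj; subst hinj; omega
        · rw [ih r (by omega)] at hvc'; simp at hvc'
      | some b =>
        rw [hb] at ih
        obtain ⟨hlt, vc, hvc, hmin⟩ := ih
        simp only [hvc]
        by_cases hcmp : e.1 < vc.1
        · simp only [if_pos hcmp]
          refine ⟨by omega, e, hk, ?_⟩
          intro r hr vc' hvc'
          by_cases hrk : r = k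
          · subst hrk; rw [hk] at hvc'; injection hvc' with hinj; subst hinj; omega
          · have := hmin r (by omega) vc' hvc'
            omega
        · simp only [if_neg hcmp]
          refine ⟨by omega, vc, hvc, ?_⟩
          intro r hr vc' hvc'
          by_cases hrk : r = k
          · subst hrk; rw [hk] at hvc'; injection hvc' with hinj; subst hinj; omega
          · exact hmin r (by omega) vc' hvc'

theorem getD_some_lt_length {front : List (Option (Int × Int))} {r : Nat} {vc : Int × Int}
    (h : front.getD r none = some vc) : r < front.length := by
  by_contra hge
  rw [List.getD_eq_getElem?_getD, List.getElem?_eq_none (by omega)] at h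
  simp at h

theorem pvFrontL_mem :
    ∀ (fs : List (Option (Int × Int))) (s : Int) (t : Int × Int × Int), t ∈ pvFrontL s fs →
      ∃ k : Nat, fs.getD k none = some (t.1, t.2.2) ∧ t.2.1 = s + k := by
  intro fs
  induction fs with
  | nil => intro s t ht; simp [pvFrontL] at ht
  | cons e fs ih =>
    intro s t ht
    cases e with
    | none =>
      obtain ⟨k, hk, hs⟩ := ih (s + 1) t ht
      exact ⟨k + 1, by simpa using hk, by push_cast; omega⟩
    | some vc =>
      simp only [pvFrontL, List.mem_cons] at ht
      rcases ht with rfl | ht'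
      · exact ⟨0, by simp, by simp⟩
      · obtain ⟨k, hk, hs⟩ := ih (s + 1) t ht'
        exact ⟨k + 1, by simpa using hk, by push_cast; omega⟩

theorem pvFrontL_set_none :
    ∀ (fs : List (Option (Int × Int))) (b : Nat) (s : Int) (vc : Int × Int),
      fs.getD b none = some vc →
        (pvFrontL s fs).Perm ((vc.1, s + b, vc.2) :: pvFrontL s (fs.set b none)) := by
  intro fs
  induction fs with
  | nil => intro b s vc h; simp at h
  | cons e fs ih =>
    intro b s vc h
    cases b with
    | zero =>
      simp only [List.getD_cons_zero] at h
      subst h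
      simp only [List.set_cons_zero, pvFrontL, Nat.cast_zero, add_zero]
      exact List.Perm.refl _
    | succ b' =>
      simp only [List.getD_cons_succ] at h
      have hperm := ih b' (s + 1) vc h
      cases e with
      | none =>
        simp only [List.set_cons_succ, pvFrontL]
        have : s + 1 + (b' : Int) = s + ((b' : Int) + 1) := by omega
        rw [this] at hperm
        exact_mod_cast hperm
      | some u =>
        simp only [List.set_cons_succ, pvFrontL]
        have hcast : s + ((b' : Int) + 1) = s + ((b' + 1 : Nat) : Int) := by push_cast; omega
        have h1 : s + 1 + (b' : Int) = s + ((b' : Int) + 1) := by omega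
        rw [h1, hcast] at hperm
        exact (hperm.cons _).trans (List.Perm.swap _ _ _)

theorem pvFrontL_set_some :
    ∀ (fs : List (Option (Int × Int))) (b : Nat) (s : Int) (w : Int × Int),
      b < fs.length →
        (pvFrontL s (fs.set b (some w))).Perm ((w.1, s + b, w.2) :: pvFrontL s (fs.set b none)) := by
  intro fs
  induction fs with
  | nil => intro b s w h; simp at h
  | cons e fs ih =>
    intro b s w h
    cases b with
    | zero =>
      simp only [List.set_cons_zero, pvFrontL, Nat.cast_zero, add_zero]
      exact List.Perm.refl _
    | succ b' =>
      have hb' : b' < fs.length := by simpa using h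
      have hperm := ih b' (s + 1) w hb'
      have h1 : s + 1 + (b' : Int) = s + ((b' + 1 : Nat) : Int) := by push_cast; omega
      rw [h1] at hperm
      cases e with
      | none =>
        simp only [List.set_cons_succ, pvFrontL]
        exact hperm
      | some u =>
        simp only [List.set_cons_succ, pvFrontL]
        exact (hperm.cons _).trans (List.Perm.swap _ _ _)

theorem pvFrontL_map_some (C : Int) (g : List Int → Int) :
    ∀ (vs : List (List Int)) (s : Int),
      pvFrontL s (vs.map (fun row => some (g row, C))) =
        (PySem.List.enumerate vs s).map (fun rc => (g rc.2, rc.1, C)) := by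
  intro vs
  induction vs with
  | nil => intro s; simp [pvFrontL, PySem.List.enumerate_nil]
  | cons row vs ih =>
    intro s
    simp only [List.map_cons, pvFrontL, PySem.List.enumerate_cons, ih]

theorem pvStep_eq (values : List (List Int)) (pq : List (Int × Int × Int))
    (front : List (Option (Int × Int))) (res day : Int)
    (hperm : pq.Perm (pvFrontL 0 front)) (hlen : front.length = values.length) :
    (maxSpendingStep values (pq, res) day).1.Perm
        (pvFrontL 0 (maxSpendingAltStep values (front, res) day).1) ∧
      (maxSpendingAltStep values (front, res) day).1.length = values.length ∧
      (maxSpendingStep values (pq, res) day).2 = (maxSpendingAltStep values (front, res) day).2 := by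
  have hspec := pvBest_spec front values.length
  cases hpop : pvPopMin? pq with
  | none =>
    have hnil : pq = [] := pvPopMin?_eq_none hpop
    subst hnil
    have hfl : pvFrontL 0 front = [] := hperm.symm.eq_nil
    cases hbest : pvBest values.length front with
    | none =>
      simp only [maxSpendingStep, maxSpendingAltStep, hpop, hbest]
      exact ⟨hperm, hlen, by trivial⟩
    | some b =>
      exfalso
      rw [hbest] at hspec
      obtain ⟨_, vc, hvc, _⟩ := hspec
      have h := pvFrontL_set_none front b 0 vc hvc
      rw [hfl] at h
      exact absurd h.symm.eq_nil (by simp)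
  | some p =>
    obtain ⟨x, rest⟩ := p
    obtain ⟨hpq, hmin⟩ := pvPopMin?_spec pq x rest hpop
    have hxpq : x ∈ pq := hpq.mem_iff.mpr (List.mem_cons_self)
    have hxF : x ∈ pvFrontL 0 front := hperm.subset hxpq
    obtain ⟨k, hk, hks⟩ := pvFrontL_mem front 0 x hxF
    have hkl : k < front.length := getD_some_lt_length hk
    cases hbest : pvBest values.length front with
    | none =>
      exfalso
      rw [hbest] at hspec
      rw [hspec k (by omega)] at hk
      simp at hk
    | some b =>
      rw [hbest] at hspec
      obtain ⟨hbn, vc, hvc, hmin2⟩ := hspec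
      have hbl : b < front.length := getD_some_lt_length hvc
      -- the heap's least triple and the scan's chosen row coincide
      have hyF : (vc.1, ((b : Nat) : Int), vc.2) ∈ pvFrontL 0 front := by
        have h := pvFrontL_set_none front b 0 vc hvc
        have h' : (vc.1, 0 + ((b : Nat) : Int), vc.2) ∈ pvFrontL 0 front :=
          h.mem_iff.mpr (List.mem_cons_self)
        simpa using h'
      have h1 : ¬ pvLt3 (vc.1, ((b : Nat) : Int), vc.2) x = true := hmin _ (hperm.mem_iff.mpr hyF)
      have h2 := hmin2 k (by omega) (x.1, x.2.2) hk
      rw [pvLt3_iff] at h1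
      simp only [not_or, not_and, not_lt] at h1 h2
      have hbk : b = k := by omega
      subst hbk
      rw [hk] at hvc
      injection hvc with hvc'
      have hks' : x.2.1 = ((b : Nat) : Int) := by omega
      have hxeq : x = ((x.1, ((b : Nat) : Int), x.2.2) : Int × Int × Int) := by
        obtain ⟨x1, x2, x3⟩ := x
        simp only at hks'
        simpa using hks'
      have hrow : ((PySem.List.pyGet? values x.2.1).getD []) = values.getD b [] := by
        rw [hks', List.getD_eq_getElem?_getD]
        simp only [PySem.List.pyGet?_natCast]
      have hrest : rest.Perm (pvFrontL 0 (front.set b none)) := by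
        have hsn := pvFrontL_set_none front b 0 (x.1, x.2.2) hk
        have h3 : pq.Perm (((x.1, x.2.2).1, 0 + ((b : Nat) : Int), (x.1, x.2.2).2)
            :: pvFrontL 0 (front.set b none)) := hperm.trans hsn
        refine List.Perm.cons_inv (a := x) ?_
        refine hpq.symm.trans ?_
        rw [hxeq]
        simpa using h3
      simp only [maxSpendingStep, maxSpendingAltStep, hpop, hbest, hk]
      by_cases hc : 0 < x.2.2
      · rw [if_pos hc, if_pos hc]
        refine ⟨?_, by simp [hlen], rfl⟩
        rw [hrow, hks']
        have hss := pvFrontL_set_some front b 0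
          ((PySem.List.pyGet? (values.getD b []) (x.2.2 - 1)).getD 0, x.2.2 - 1) hbl
        refine ((List.perm_append_singleton _ _).trans (hrest.cons _)).trans ?_
        simpa using hss.symm
      · rw [if_neg hc, if_neg hc]
        exact ⟨hrest, by simp [hlen], rfl⟩

theorem pvFold_eq (values : List (List Int)) :
    ∀ (days : List Int) (pq : List (Int × Int × Int)) (front : List (Option (Int × Int))) (res : Int),
      pq.Perm (pvFrontL 0 front) → front.length = values.length →
        (days.foldl (maxSpendingStep values) (pq, res)).2 =
          (days.foldl (maxSpendingAltStep values) (front, res)).2 := by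
  intro days
  induction days with
  | nil => intro pq front res _ _; rfl
  | cons d ds ih =>
    intro pq front res hperm hlen
    have h := pvStep_eq values pq front res d hperm hlen
    simp only [List.foldl_cons]
    have hres : (maxSpendingStep values (pq, res) d).2 = (maxSpendingAltStep values (front, res) d).2 :=
      h.2.2
    calc (ds.foldl (maxSpendingStep values) (maxSpendingStep values (pq, res) d)).2
        = (ds.foldl (maxSpendingAltStep values) (maxSpendingAltStep values (front, res) d)).2 := by
          rw [show maxSpendingStep values (pq, res) d =
                ((maxSpendingStep values (pq, res) d).1, (maxSpendingStep values (pq, res) d).2) from rfl,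
              show maxSpendingAltStep values (front, res) d =
                ((maxSpendingAltStep values (front, res) d).1, (maxSpendingAltStep values (front, res) d).2) from rfl,
              hres]
          exact ih _ _ _ h.1 h.2.1

-- ===== VERDICT =====
theorem maxSpending_spec : Claim_equal_maxSpending := by
  intro values _ _
  unfold Spec_maxSpending maxSpending maxSpending_alt
  refine pvFold_eq values _ _ _ 0 ?_ (by simp)
  rw [pvFrontL_map_some (((PySem.List.pyGet? values 0).getD []).length - 1)
    (fun row => (PySem.List.pyGet? row (-1)).getD 0) values 0]
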